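-- pv_equiv track=rewrite | github.com/koni114/algorithm-study-for-certi-pro | become-a-coding-test-passer/problem_4.py | solution
-- ===== SOURCE A (Python) =====
-- def solution(answers):
--     patterns = [
--         [5, [1, 2, 3, 4, 5]],
--         [8, [2, 1, 2, 3, 2, 4, 2, 5]],
--         [10, [3, 3, 1, 1, 2, 2, 4, 4, 5, 5]]
--         ]
--     answer = []
--     for nums_len, nums in patterns:
--        answer.append((sum([ answers[i] == nums[i % nums_len]
--             for i in range(len(answers))])))
--
--     max_v = max(answer)
--     max_idx = []
--     for idx, v in enumerate(answer):
--         if v == max_v: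
--             max_idx.append(idx + 1)
--     return max_idx
-- ===== SOURCE B (Python) =====
-- def solution(answers):
--     # Histogram approach: one pass builds a count of (position mod 40, answer)
--     # pairs (40 = lcm of the three pattern periods); each pattern's score is then
--     # a fixed 40-term dictionary sum against its length-40 cycle expansion.
--     cnt = {}
--     for i, a in enumerate(answers):
--         cnt[(i % 40, a)] = cnt.get((i % 40, a), 0) + 1
--     bases = [[1, 2, 3, 4, 5],
--              [2, 1, 2, 3, 2, 4, 2, 5],
--              [3, 3, 1, 1, 2, 2, 4, 4, 5, 5]]
--     cycles = [p * (40 // len(p)) for p in bases]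
--     scores = [sum(cnt.get((r, c[r]), 0) for r in range(40)) for c in cycles]
--     best = max(scores)
--     return [k + 1 for k, s in enumerate(scores) if s == best]
-- ===== Notes on version B (the rewrite author's own statement) =====
-- stated objective: alternative
-- what changed: Replaces A's three per-pattern sweeps over the answers (each re-reading the whole list with modulo indexing) with a single-pass histogram keyed by (position mod 40, answer) -- 40 = lcm of the pattern periods -- after which each pattern's score is a fixed 40-term dictionary sum against its precomputed length-40 cycle expansion.
import Mathlib
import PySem

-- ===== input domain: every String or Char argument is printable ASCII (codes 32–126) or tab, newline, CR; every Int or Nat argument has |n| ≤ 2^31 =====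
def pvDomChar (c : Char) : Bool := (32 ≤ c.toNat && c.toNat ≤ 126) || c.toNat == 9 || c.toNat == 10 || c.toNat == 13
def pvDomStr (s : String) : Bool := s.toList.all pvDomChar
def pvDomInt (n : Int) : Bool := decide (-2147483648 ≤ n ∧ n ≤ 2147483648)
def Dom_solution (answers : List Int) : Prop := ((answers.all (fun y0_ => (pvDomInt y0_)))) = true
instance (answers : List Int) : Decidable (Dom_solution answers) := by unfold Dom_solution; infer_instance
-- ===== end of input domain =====

-- B replaces A's three per-pattern sweeps with a single-pass histogram keyed by
-- (index mod 40, answer) and fixed 40-term dictionary sums (alternative algorithm, same cost).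


-- ===== PORT A =====
def solution (answers : List Int) : List Int :=
  let patterns : List (Int × List Int) :=
    [(5, [1, 2, 3, 4, 5]),
     (8, [2, 1, 2, 3, 2, 4, 2, 5]),
     (10, [3, 3, 1, 1, 2, 2, 4, 4, 5, 5])]
  let answer : List Int :=
    patterns.foldl (fun acc p =>
      acc ++ [(PySem.List.pyRange 0 (answers.length : Int) 1).foldl
        (fun s i =>
          s + (if PySem.List.pyGetD answers i 0 = PySem.List.pyGetD p.2 (PySem.Int.mod i p.1) 0
               then 1 else 0)) 0]) []
  let max_v : Int := (PySem.List.max? answer (fun x => x)).getD 0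
  (PySem.List.enumerate answer 0).foldl
    (fun acc p => if p.2 = max_v then acc ++ [p.1 + 1] else acc) []

-- ===== PORT B =====
def solution_alt (answers : List Int) : List Int :=
  let cnt : PySem.Dict (Int × Int) Int :=
    (PySem.List.enumerate answers 0).foldl
      (fun d ia =>
        d.insert (PySem.Int.mod ia.1 40, ia.2)
          (d.getD (PySem.Int.mod ia.1 40, ia.2) 0 + 1)) PySem.Dict.empty
  let bases : List (List Int) :=
    [[1, 2, 3, 4, 5],
     [2, 1, 2, 3, 2, 4, 2, 5],
     [3, 3, 1, 1, 2, 2, 4, 4, 5, 5]]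
  let cycles : List (List Int) :=
    bases.map (fun p => PySem.List.pyRepeat p (PySem.Int.floordiv 40 (p.length : Int)))
  let scores : List Int :=
    cycles.map (fun c =>
      ((PySem.List.pyRange 0 40 1).map
        (fun r => cnt.getD (r, PySem.List.pyGetD c r 0) 0)).sum)
  let best : Int := (PySem.List.max? scores (fun x => x)).getD 0
  ((PySem.List.enumerate scores 0).filter (fun q => q.2 == best)).map (fun q => q.1 + 1)

-- ===== PRECONDITION & SPEC =====
def Spec_solution (answers : List Int) (out : List Int) : Prop := out = solution_alt answers
instance (answers : List Int) (out : List Int) : Decidable (Spec_solution answers out) := by unfold Spec_solution; infer_instance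

-- ===== CLAIM (what is proved, stated in full; the proofs are below) =====
def Claim_equal_solution : Prop := ∀ (answers : List Int), Dom_solution answers → Spec_solution answers (solution answers)

-- ===== LEMMAS AND PROOFS =====

-- the key list B's histogram counts: (i mod 40, answers[i]) for each index i
def pvKeys (answers : List Int) : List (Int × Int) :=
  (PySem.List.enumerate answers 0).map (fun ia => (PySem.Int.mod ia.1 40, ia.2))

-- B's histogram, looked up at v, is the count of v among those keys
theorem pv_cnt_getD (answers : List Int) (v : Int × Int) :
    ((PySem.List.enumerate answers 0).foldl
      (fun d ia =>
        d.insert (PySem.Int.mod ia.1 40, ia.2)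
          (d.getD (PySem.Int.mod ia.1 40, ia.2) 0 + 1)) (PySem.Dict.empty : PySem.Dict (Int × Int) Int)).getD v 0
    = ((pvKeys answers).count v : Int) := by
  unfold pvKeys
  rw [← List.foldl_map (f := fun ia : Int × Int => (PySem.Int.mod ia.1 40, ia.2))
        (g := fun (d : PySem.Dict (Int × Int) Int) k => d.insert k (d.getD k 0 + 1))]
  rw [PySem.Dict.getD_foldl_insert_add_one]
  simp [PySem.Dict.empty, PySem.Dict.getD, PySem.Dict.get?]

-- summing the indicator of one fixed key over all residues picks it out once
theorem pv_point_sum (g : Int → Int) (n m : Nat) (v : Int) (hm : m < n) :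
    ((List.range n).map (fun r : Nat => if (((r : Int), g (r : Int)) : Int × Int) = ((m : Int), v) then (1 : Nat) else 0)).sum
      = if v = g (m : Int) then 1 else 0 := by
  have h0 : ((List.range n).map (fun r : Nat => if (((r : Int), g (r : Int)) : Int × Int) = ((m : Int), v) then (1 : Nat) else 0)).sum
      = ∑ r ∈ Finset.range n, if (((r : Int), g (r : Int)) : Int × Int) = ((m : Int), v) then (1 : Nat) else 0 := rfl
  rw [h0]
  have h1 : ∀ r ∈ Finset.range n,
      (if (((r : Int), g (r : Int)) : Int × Int) = ((m : Int), v) then (1 : Nat) else 0)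
        = if r = m then (if v = g (m : Int) then (1 : Nat) else 0) else 0 := by
    intro r _
    by_cases h : r = m
    · subst h; simp [Prod.ext_iff, eq_comm]
    · have h' : ¬((r : Int) = (m : Int)) := by exact_mod_cast h
      simp [Prod.ext_iff, h, h']
  rw [Finset.sum_congr rfl h1, Finset.sum_ite_eq' (Finset.range n) m]
  simp [hm]

-- transpose: summing per-residue counts over all residues counts every key once
theorem pv_transpose (g : Int → Int) (n : Nat) (ks : List (Int × Int))
    (h : ∀ q ∈ ks, ∃ m : Nat, m < n ∧ q.1 = (m : Int)) :
    ((List.range n).map (fun r : Nat => ks.count (((r : Int), g (r : Int))))).sum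
      = ks.countP (fun q => q.2 == g q.1) := by
  induction ks with
  | nil => simp
  | cons q t ih =>
    obtain ⟨m, hm, hq1⟩ := h q (by simp)
    have hq : q = (((m : Int), q.2) : Int × Int) := by
      rw [Prod.ext_iff]; exact ⟨hq1, rfl⟩
    have ht := ih (fun x hx => h x (List.mem_cons_of_mem _ hx))
    have hsplit : ∀ r : Nat, (q :: t).count (((r : Int), g (r : Int)) : Int × Int)
        = t.count (((r : Int), g (r : Int)) : Int × Int)
          + (if (((r : Int), g (r : Int)) : Int × Int) = ((m : Int), q.2) then 1 else 0) := by
      intro r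
      rw [List.count_cons]
      by_cases hc : (((r : Int), g (r : Int)) : Int × Int) = ((m : Int), q.2)
      · simp [hc, ← hq]
      · rw [hq]
        simp only [beq_iff_eq, Prod.mk.injEq]
        have h1 : ¬(m = r ∧ q.2 = g (r : Int)) := by
          rintro ⟨hmr, hqv⟩
          exact hc (by subst hmr; simp [hqv])
        have h2 : ¬(r = m ∧ g (r : Int) = q.2) := by
          rintro ⟨hrm, hqv⟩
          exact h1 ⟨hrm.symm, hqv.symm⟩
        simp [h1, h2]
    calc ((List.range n).map (fun r : Nat => (q :: t).count (((r : Int), g (r : Int))))).sum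
        = ((List.range n).map (fun r : Nat =>
            t.count (((r : Int), g (r : Int)))
              + (if (((r : Int), g (r : Int)) : Int × Int) = ((m : Int), q.2) then 1 else 0))).sum := by
          exact congrArg List.sum (List.map_congr_left (fun r _ => hsplit r))
      _ = ((List.range n).map (fun r : Nat => t.count (((r : Int), g (r : Int))))).sum
            + ((List.range n).map (fun r : Nat => if (((r : Int), g (r : Int)) : Int × Int) = ((m : Int), q.2) then 1 else 0)).sum := by
          rw [← List.sum_map_add]
      _ = t.countP (fun q => q.2 == g q.1) + (if q.2 = g (m : Int) then 1 else 0) := by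
          rw [ht, pv_point_sum g n m q.2 hm]
      _ = (q :: t).countP (fun q => q.2 == g q.1) := by
          rw [List.countP_cons]
          have : ((((m : Int), q.2) : Int × Int).2 == g (((m : Int), q.2) : Int × Int).1) = ((q.2 == g (m : Int))) := by
            rfl
          rw [hq, this]
          by_cases hv : q.2 = g (m : Int)
          · simp [hv]
          · simp [hv, beq_iff_eq]

-- one pattern: B's 40-term histogram sum equals A's per-index sweep
theorem pv_score_eq (answers p c : List Int) (LN : Nat) (LI : Int) (hdvd : LN ∣ 40)
    (hLI : LI = (LN : Int))
    (hc : ∀ j : Nat, j < 40 → PySem.List.pyGetD c ((j : Nat) : Int) 0 = PySem.List.pyGetD p (((j % LN : Nat)) : Int) 0) :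
    ((PySem.List.pyRange 0 (40 : Int)).map
       (fun r => ((PySem.List.enumerate answers 0).foldl
          (fun d ia =>
            d.insert (PySem.Int.mod ia.1 40, ia.2)
              (d.getD (PySem.Int.mod ia.1 40, ia.2) 0 + 1)) (PySem.Dict.empty : PySem.Dict (Int × Int) Int)).getD
          (r, PySem.List.pyGetD c r 0) 0)).sum
    = (PySem.List.pyRange 0 (answers.length : Int)).foldl
        (fun s i => s + (if PySem.List.pyGetD answers i 0 = PySem.List.pyGetD p (PySem.Int.mod i LI) 0 then 1 else 0)) 0 := by
  subst hLI
  simp only [pv_cnt_getD]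
  rw [show (40 : Int) = ((40 : Nat) : Int) from rfl]
  rw [PySem.List.pyRange_zero_natCast 40, List.map_map]
  have hcast : ((List.range 40).map
      ((fun r => ((pvKeys answers).count (r, PySem.List.pyGetD c r 0) : Int)) ∘ (fun k : Nat => (k : Int)))).sum
      = (((List.range 40).map
          (fun k : Nat => (pvKeys answers).count (((k : Int), PySem.List.pyGetD c (k : Int) 0)))).sum : Nat) := by
    rw [Nat.cast_list_sum, List.map_map]
    rfl
  rw [hcast]
  rw [pv_transpose (fun r => PySem.List.pyGetD c r 0) 40 (pvKeys answers) ?hks]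
  case hks =>
    intro q hq
    unfold pvKeys at hq
    obtain ⟨ia, _, rfl⟩ := List.mem_map.mp hq
    refine ⟨(PySem.Int.mod ia.1 40).toNat, ?_, ?_⟩
    · have h40 : PySem.Int.mod ia.1 40 < 40 := PySem.Int.mod_lt ia.1 (by norm_num)
      omega
    · have h0 : 0 ≤ PySem.Int.mod ia.1 40 := PySem.Int.mod_nonneg ia.1 (by norm_num)
      simp
      omega
  unfold pvKeys
  rw [List.countP_map, PySem.List.enumerate_eq_map_pyRange answers 0, List.countP_map]
  rw [PySem.List.foldl_add, zero_add]
  have hite : (fun i => if PySem.List.pyGetD answers i 0 = PySem.List.pyGetD p (PySem.Int.mod i ((LN : Nat) : Int)) 0 then (1 : Int) else 0)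
      = fun i => if (fun j => decide (PySem.List.pyGetD answers j 0 = PySem.List.pyGetD p (PySem.Int.mod j ((LN : Nat) : Int)) 0)) i = true then (1 : Int) else 0 := by
    funext i; simp
  rw [hite, PySem.List.sum_map_ite_one_zero]
  have hlen : PySem.List.len answers = (answers.length : Int) := rfl
  rw [hlen]
  congr 1
  apply List.countP_congr
  intro i hi
  have h0i : 0 ≤ i := (PySem.List.mem_pyRange_one.mp hi).1
  obtain ⟨m, rfl⟩ : ∃ m : Nat, i = (m : Int) := ⟨i.toNat, by omega⟩
  simp only [Function.comp_apply]
  rw [Bool.beq_eq_decide_eq]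
  have h40 : (40 : Int) = ((40 : Nat) : Int) := rfl
  have hmod40 : PySem.Int.mod ((m : Nat) : Int) 40 = (((m % 40 : Nat)) : Int) := by
    rw [h40, PySem.Int.mod_natCast]
  have hmodL : PySem.Int.mod ((m : Nat) : Int) ((LN : Nat) : Int) = (((m % LN : Nat)) : Int) :=
    PySem.Int.mod_natCast m LN
  rw [hmod40, hmodL, hc (m % 40) (Nat.mod_lt _ (by norm_num)), Nat.mod_mod_of_dvd m hdvd]

-- A's append-if argmax loop is B's filter-map comprehension
theorem pv_tail (l : List Int) (b : Int) :
    (PySem.List.enumerate l 0).foldl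
      (fun acc q => if q.2 = b then acc ++ [q.1 + 1] else acc) []
    = ((PySem.List.enumerate l 0).filter (fun q => q.2 == b)).map (fun q => q.1 + 1) := by
  rw [PySem.List.foldl_append_ite (p := fun q : Int × Int => q.2 = b) (f := fun q : Int × Int => q.1 + 1)]
  simp only [List.nil_append]
  have hflt : ∀ x ∈ PySem.List.enumerate l 0, (decide (x.2 = b)) = (x.2 == b) :=
    fun x _ => (Bool.beq_eq_decide_eq x.2 b).symm
  rw [List.filter_congr hflt]

theorem solution_eq_alt (answers : List Int) : solution answers = solution_alt answers := by
  unfold solution solution_alt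
  simp only [List.foldl_cons, List.foldl_nil, List.map_cons, List.map_nil,
    List.nil_append, List.cons_append, List.length_cons, List.length_nil, Nat.reduceAdd]
  rw [pv_score_eq answers [1, 2, 3, 4, 5]
        (PySem.List.pyRepeat [1, 2, 3, 4, 5] (PySem.Int.floordiv 40 ((5 : Nat) : Int)))
        5 5 (by norm_num) rfl (by decide),
      pv_score_eq answers [2, 1, 2, 3, 2, 4, 2, 5]
        (PySem.List.pyRepeat [2, 1, 2, 3, 2, 4, 2, 5] (PySem.Int.floordiv 40 ((8 : Nat) : Int)))
        8 8 (by norm_num) rfl (by decide),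
      pv_score_eq answers [3, 3, 1, 1, 2, 2, 4, 4, 5, 5]
        (PySem.List.pyRepeat [3, 3, 1, 1, 2, 2, 4, 4, 5, 5] (PySem.Int.floordiv 40 ((10 : Nat) : Int)))
        10 10 (by norm_num) rfl (by decide)]
  exact pv_tail _ _

-- ===== VERDICT (by name: the statement is the Claim_ definition above) =====
theorem solution_spec : Claim_equal_solution := by
  intro answers _
  unfold Spec_solution
  exact solution_eq_alt answers
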